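-- pv_equiv track=rewrite | github.com/praghav27/document_processing | main.py | _extract_document_title
-- ===== SOURCE A (Python) =====
-- def _extract_document_title(raw_text: str) -> str:
--     """Extract document title from raw text"""
--
--     if not raw_text:
--         return "Unknown Document"
--
--     # Look for title in first few lines
--     lines = raw_text.split('\n')[:10]  # Check first 10 lines
--
--     for line in lines:
--         line = line.strip()
--         if len(line) > 10 and len(line) < 100:
--             # Check if line looks like a title
--             if (line.isupper() or
--                 (line[0].isupper() and not line.endswith('.')) or
--                 ':' in line):
--                 return line
--
--     # Fallback: use first substantial line
--     for line in lines:
--         line = line.strip()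
--         if len(line) > 20:
--             return line[:100] + "..." if len(line) > 100 else line
--
--     return "Unknown Document"
-- ===== SOURCE B (Python) =====
-- def _extract_document_title(raw_text: str) -> str:
--     """Extract document title from raw text (single pass with fallback accumulator)"""
--
--     if not raw_text:
--         return "Unknown Document"
--
--     fallback = None
--     for line in raw_text.split('\n')[:10]:
--         line = line.strip()
--         if 10 < len(line) < 100 and (line.isupper() or
--                                      (line[0].isupper() and not line.endswith('.')) or
--                                      ':' in line):
--             return line
--         if fallback is None and len(line) > 20:
--             fallback = line
--
--     if fallback is None:
--         return "Unknown Document"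
--     return fallback[:100] + "..." if len(fallback) > 100 else fallback
-- ===== Notes on version B (the rewrite author's own statement) =====
-- stated objective: alternative
-- what changed: Replaces A's two sequential passes over the first 10 lines (title scan, then fallback scan) by one single pass that returns a title immediately and records the first >20-char line in a fallback accumulator, stripping each line once instead of twice.
import Mathlib
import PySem

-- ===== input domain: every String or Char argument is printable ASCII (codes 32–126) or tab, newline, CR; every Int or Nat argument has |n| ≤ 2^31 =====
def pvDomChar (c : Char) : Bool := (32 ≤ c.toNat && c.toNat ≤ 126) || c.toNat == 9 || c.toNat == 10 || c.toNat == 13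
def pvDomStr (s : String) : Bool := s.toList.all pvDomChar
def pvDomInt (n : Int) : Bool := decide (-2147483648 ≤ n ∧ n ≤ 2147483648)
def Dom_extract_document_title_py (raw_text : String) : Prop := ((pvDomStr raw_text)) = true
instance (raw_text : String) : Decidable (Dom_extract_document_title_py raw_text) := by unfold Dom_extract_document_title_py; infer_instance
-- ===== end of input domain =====

-- B replaces A's two sequential passes over the first 10 lines by one pass with a fallback accumulator (objective: alternative; same cost).

-- shared helpers: the SAME subexpressions occur verbatim in both Pythons
-- line.isupper(): at least one cased char and no lowercase one — exact on the ASCII domain,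
-- where the cased characters are exactly 'A'-'Z' and 'a'-'z'
def pvIsUpperStr (l : String) : Bool :=
  l.toList.any PySem.Chars.isupper && !(l.toList.any PySem.Chars.islower)

-- line[0].isupper(); both Pythons evaluate it only under len(line) > 10, so the [] case is unreachable there
def pvHeadUpper (l : String) : Bool :=
  match l.toList with
  | c :: _ => PySem.Chars.isupper c
  | [] => false

-- the title heuristic 'line.isupper() or (line[0].isupper() and not line.endswith(".")) or ":" in line'
def pvHeur (l : String) : Bool :=
  pvIsUpperStr l || (pvHeadUpper l && !PySem.Str.endswith l ".") || PySem.Str.isIn ":" l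

-- 'line[:100] + "..." if len(line) > 100 else line'
def pvTrunc (l : String) : String :=
  if 100 < PySem.Str.len l then PySem.Str.slice l none (some 100) ++ "..." else l

-- ===== PORT A =====
-- first loop of A: return the first stripped line that is a title
def pvLoopA1 : List String → Option String
  | [] => none
  | line :: rest =>
      let l := PySem.Str.strip line
      if 10 < PySem.Str.len l ∧ PySem.Str.len l < 100 then
        if pvHeur l = true then some l else pvLoopA1 rest
      else pvLoopA1 rest

-- second loop of A: first stripped line longer than 20 characters, else "Unknown Document"
def pvLoopA2 : List String → String
  | [] => "Unknown Document"
  | line :: rest =>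
      let l := PySem.Str.strip line
      if 20 < PySem.Str.len l then pvTrunc l else pvLoopA2 rest

def extract_document_title_py (raw_text : String) : String :=
  if raw_text == "" then "Unknown Document"
  else
    -- split? is some for the nonempty separator literal "\n"; getD's default is unreachable
    let lines := ((PySem.Str.split? raw_text "\n").getD []).take 10
    match pvLoopA1 lines with
    | some t => t
    | none => pvLoopA2 lines

-- ===== PORT B =====
-- single pass: return a title at once, remember the first >20-char stripped line as fallback
def pvScanB : List String → Option String → String
  | [], fb =>
      match fb with
      | some l => pvTrunc l
      | none => "Unknown Document"
  | line :: rest, fb =>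
      let l := PySem.Str.strip line
      if (10 < PySem.Str.len l ∧ PySem.Str.len l < 100) ∧ pvHeur l = true then l
      else pvScanB rest (if fb = none ∧ 20 < PySem.Str.len l then some l else fb)

def extract_document_title_py_alt (raw_text : String) : String :=
  if raw_text == "" then "Unknown Document"
  else pvScanB (((PySem.Str.split? raw_text "\n").getD []).take 10) none

-- ===== PRECONDITION & SPEC =====
def Spec_extract_document_title_py (raw_text : String) (out : String) : Prop := out = extract_document_title_py_alt raw_text
instance (raw_text : String) (out : String) : Decidable (Spec_extract_document_title_py raw_text out) := by unfold Spec_extract_document_title_py; infer_instance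

-- ===== CLAIM (what is proved, stated in full; the proofs are below) =====
def Claim_equal_extract_document_title_py : Prop := ∀ (raw_text : String), Dom_extract_document_title_py raw_text → Spec_extract_document_title_py raw_text (extract_document_title_py raw_text)

-- ===== LEMMAS AND PROOFS =====

-- the single pass equals 'first title, else pending fallback, else second pass'
theorem pvScanB_eq (lines : List String) (fb : Option String) :
    pvScanB lines fb =
      match pvLoopA1 lines with
      | some t => t
      | none =>
          match fb with
          | some l => pvTrunc l
          | none => pvLoopA2 lines := by
  induction lines generalizing fb with
  | nil => cases fb <;> simp [pvScanB, pvLoopA1, pvLoopA2]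
  | cons line rest ih =>
      simp only [pvScanB, pvLoopA1, pvLoopA2]
      by_cases hc : (10 < PySem.Str.len (PySem.Str.strip line) ∧
            PySem.Str.len (PySem.Str.strip line) < 100) ∧ pvHeur (PySem.Str.strip line) = true
      · rw [if_pos hc, if_pos hc.1, if_pos hc.2]
      · rw [if_neg hc, ih]
        have hA : (if 10 < PySem.Str.len (PySem.Str.strip line) ∧
                      PySem.Str.len (PySem.Str.strip line) < 100 then
                     if pvHeur (PySem.Str.strip line) = true then some (PySem.Str.strip line)
                     else pvLoopA1 rest
                   else pvLoopA1 rest) = pvLoopA1 rest := by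
          split_ifs with h1 h2
          · exact absurd ⟨h1, h2⟩ hc
          · rfl
          · rfl
        rw [hA]
        cases pvLoopA1 rest with
        | some t => rfl
        | none =>
            cases fb with
            | some l0 => simp
            | none => split_ifs with h1 h2 <;> simp_all <;> omega

-- ===== VERDICT (by name: the statement is the Claim_ definition above) =====
theorem extract_document_title_py_spec : Claim_equal_extract_document_title_py := by
  intro raw_text _
  unfold Spec_extract_document_title_py extract_document_title_py extract_document_title_py_alt
  by_cases h : raw_text == ""
  · simp [h]
  · simp only [h, Bool.false_eq_true, if_false]
    rw [pvScanB_eq]
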